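-- pv_equiv track=rewrite | github.com/seriousplay/bazi-energy-mvp | bazi_engine_enhanced.py | _calculate_hour_index
-- ===== SOURCE A (Python) =====
-- def _calculate_hour_index(hour: int, minute: int) -> int:
--     """
--     精确计算时辰地支索引 - 考虑分钟边界
--     时辰边界：23:00-0:59子时, 1:00-2:59丑时, 以此类推
--     """
--     # 将时分转换为分钟总数
--     total_minutes = hour * 60 + minute
--
--     # 时辰边界定义（分钟为单位）
--     time_boundaries = [
--         (23 * 60, 24 * 60 + 59),     # 子时 23:00-0:59 (跨日)
--         (1 * 60, 2 * 60 + 59),       # 丑时 1:00-2:59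
--         (3 * 60, 4 * 60 + 59),       # 寅时 3:00-4:59
--         (5 * 60, 6 * 60 + 59),       # 卯时 5:00-6:59
--         (7 * 60, 8 * 60 + 59),       # 辰时 7:00-8:59
--         (9 * 60, 10 * 60 + 59),      # 巳时 9:00-10:59
--         (11 * 60, 12 * 60 + 59),     # 午时 11:00-12:59
--         (13 * 60, 14 * 60 + 59),     # 未时 13:00-14:59
--         (15 * 60, 16 * 60 + 59),     # 申时 15:00-16:59
--         (17 * 60, 18 * 60 + 59),     # 酉时 17:00-18:59
--         (19 * 60, 20 * 60 + 59),     # 戌时 19:00-20:59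
--         (21 * 60, 22 * 60 + 59),     # 亥时 21:00-22:59
--     ]
--
--     # 特殊处理跨日的子时
--     if total_minutes >= 23 * 60 or total_minutes <= 59:
--         return 0  # 子时
--
--     # 检查其他时辰
--     for i, (start, end) in enumerate(time_boundaries[1:], 1):
--         if start <= total_minutes <= end:
--             return i
--
--     # 默认返回子时（安全边界）
--     return 0
-- ===== SOURCE B (Python) =====
-- def _calculate_hour_index(hour: int, minute: int) -> int:
--     total_minutes = hour * 60 + minute
--     if total_minutes >= 23 * 60 or total_minutes <= 59:
--         return 0
--     return (total_minutes + 60) // 120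
-- ===== Notes on version B (the rewrite author's own statement) =====
-- stated objective: simpler
-- what changed: Replaces the 11-entry boundary table and linear scan with the closed-form arithmetic (total_minutes + 60) // 120 after the same cross-midnight guard.
import Mathlib
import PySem

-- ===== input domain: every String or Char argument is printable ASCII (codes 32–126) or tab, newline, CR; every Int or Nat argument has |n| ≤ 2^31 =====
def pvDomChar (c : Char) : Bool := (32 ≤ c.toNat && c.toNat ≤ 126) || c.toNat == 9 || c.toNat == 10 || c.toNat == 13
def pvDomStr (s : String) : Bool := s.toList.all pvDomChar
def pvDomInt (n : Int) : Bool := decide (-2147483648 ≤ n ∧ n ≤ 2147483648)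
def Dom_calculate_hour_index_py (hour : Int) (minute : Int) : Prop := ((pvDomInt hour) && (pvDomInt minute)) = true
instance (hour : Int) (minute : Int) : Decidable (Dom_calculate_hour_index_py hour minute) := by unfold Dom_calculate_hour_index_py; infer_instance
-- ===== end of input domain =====

-- B replaces the boundary-table scan with closed-form arithmetic (tm + 60) // 120; same guard, same results.


-- ===== PORT A =====
-- loop over enumerate(time_boundaries[1:], 1): first (start,end) with start <= tm <= end wins
def pvLoopA (tm : Int) : List (Int × Int × Int) → Int
  | [] => 0  -- default return (safe boundary)
  | (i, s, e) :: rest => if s ≤ tm ∧ tm ≤ e then i else pvLoopA tm rest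

def calculate_hour_index_py (hour : Int) (minute : Int) : Int :=
  let total_minutes := hour * 60 + minute
  if total_minutes ≥ 23 * 60 ∨ total_minutes ≤ 59 then 0
  else
    pvLoopA total_minutes
      [(1, 1*60, 2*60+59), (2, 3*60, 4*60+59), (3, 5*60, 6*60+59),
       (4, 7*60, 8*60+59), (5, 9*60, 10*60+59), (6, 11*60, 12*60+59),
       (7, 13*60, 14*60+59), (8, 15*60, 16*60+59), (9, 17*60, 18*60+59),
       (10, 19*60, 20*60+59), (11, 21*60, 22*60+59)]

-- ===== PORT B =====
def calculate_hour_index_py_alt (hour : Int) (minute : Int) : Int :=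
  let total_minutes := hour * 60 + minute
  if total_minutes ≥ 23 * 60 ∨ total_minutes ≤ 59 then 0
  else PySem.Int.floordiv (total_minutes + 60) 120

-- ===== PRECONDITION & SPEC =====
def Spec_calculate_hour_index_py (hour : Int) (minute : Int) (out : Int) : Prop := out = calculate_hour_index_py_alt hour minute
instance (hour : Int) (minute : Int) (out : Int) : Decidable (Spec_calculate_hour_index_py hour minute out) := by unfold Spec_calculate_hour_index_py; infer_instance

-- ===== CLAIM (what is proved, stated in full; the proofs are below) =====
def Claim_equal_calculate_hour_index_py : Prop := ∀ (hour : Int) (minute : Int), Dom_calculate_hour_index_py hour minute → Spec_calculate_hour_index_py hour minute (calculate_hour_index_py hour minute)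

-- ===== LEMMAS AND PROOFS =====

-- ===== VERDICT (by name: the statement is the Claim_ definition above) =====
set_option maxHeartbeats 1000000 in
theorem calculate_hour_index_py_spec : Claim_equal_calculate_hour_index_py := by
  intro hour minute _
  show calculate_hour_index_py hour minute = calculate_hour_index_py_alt hour minute
  simp only [calculate_hour_index_py, calculate_hour_index_py_alt, pvLoopA]
  have hfd : PySem.Int.floordiv (hour * 60 + minute + 60) 120
      = (hour * 60 + minute + 60) / 120 := by
    exact PySem.Int.floordiv_eq_ediv_of_pos (by norm_num)
  by_cases h0 : hour * 60 + minute ≥ 23 * 60 ∨ hour * 60 + minute ≤ 59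
  · rw [if_pos h0, if_pos h0]
  · rw [if_neg h0, if_neg h0, hfd]
    by_cases h1 : 1 * 60 ≤ hour * 60 + minute ∧ hour * 60 + minute ≤ 2 * 60 + 59
    · rw [if_pos h1]; omega
    · rw [if_neg h1]
      by_cases h2 : 3 * 60 ≤ hour * 60 + minute ∧ hour * 60 + minute ≤ 4 * 60 + 59
      · rw [if_pos h2]; omega
      · rw [if_neg h2]
        by_cases h3 : 5 * 60 ≤ hour * 60 + minute ∧ hour * 60 + minute ≤ 6 * 60 + 59
        · rw [if_pos h3]; omega
        · rw [if_neg h3]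
          by_cases h4 : 7 * 60 ≤ hour * 60 + minute ∧ hour * 60 + minute ≤ 8 * 60 + 59
          · rw [if_pos h4]; omega
          · rw [if_neg h4]
            by_cases h5 : 9 * 60 ≤ hour * 60 + minute ∧ hour * 60 + minute ≤ 10 * 60 + 59
            · rw [if_pos h5]; omega
            · rw [if_neg h5]
              by_cases h6 : 11 * 60 ≤ hour * 60 + minute ∧ hour * 60 + minute ≤ 12 * 60 + 59
              · rw [if_pos h6]; omega
              · rw [if_neg h6]
                by_cases h7 : 13 * 60 ≤ hour * 60 + minute ∧ hour * 60 + minute ≤ 14 * 60 + 59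
                · rw [if_pos h7]; omega
                · rw [if_neg h7]
                  by_cases h8 : 15 * 60 ≤ hour * 60 + minute ∧ hour * 60 + minute ≤ 16 * 60 + 59
                  · rw [if_pos h8]; omega
                  · rw [if_neg h8]
                    by_cases h9 : 17 * 60 ≤ hour * 60 + minute ∧ hour * 60 + minute ≤ 18 * 60 + 59
                    · rw [if_pos h9]; omega
                    · rw [if_neg h9]
                      by_cases h10 : 19 * 60 ≤ hour * 60 + minute ∧ hour * 60 + minute ≤ 20 * 60 + 59
                      · rw [if_pos h10]; omega
                      · rw [if_neg h10]
                        by_cases h11 : 21 * 60 ≤ hour * 60 + minute ∧ hour * 60 + minute ≤ 22 * 60 + 59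
                        · rw [if_pos h11]; omega
                        · rw [if_neg h11]
                          omega
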